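-- pv_equiv track=rewrite | github.com/yuchouxuan/study-ctf | utfc/EZcry.py | _ql2
-- ===== SOURCE A (Python) =====
-- def _ql2(txt, h, l=0):
--     t = str(txt).replace(" ", "");
--     if h == 0: return;
--     if (l == 0): l = int(t.__len__() / h);
--     box = [""] * h * l
--     desc = False
--     cont = 0
--     for lx in range(l):
--         thl = l - lx - 1
--         for hx in range(h):
--             thh = hx
--             if (desc): thh = h - hx - 1
--             if (cont < t.__len__()): box[(thh) * l + thl] = t[cont]
--             cont += 1
--         desc = not desc
--     return box
-- ===== SOURCE B (Python) =====
-- def _ql2(txt, h, l=0):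
--     t = str(txt).replace(" ", "")
--     if h == 0:
--         return
--     if l == 0:
--         l = int(len(t) / h)
--
--     def cell(row, col):
--         lx = l - 1 - col
--         hx = row if lx % 2 == 0 else h - 1 - row
--         cont = lx * h + hx
--         return t[cont] if cont < len(t) else ""
--
--     return [cell(row, col) for row in range(h) for col in range(l)]
-- ===== Notes on version B (the rewrite author's own statement) =====
-- stated objective: alternative
-- what changed: Replaces the nested write loops with toggling desc/cont state mutating a preallocated box by a pure comprehension that computes each grid cell's source character index in closed form from its (row, col) position.
import Mathlib
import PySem

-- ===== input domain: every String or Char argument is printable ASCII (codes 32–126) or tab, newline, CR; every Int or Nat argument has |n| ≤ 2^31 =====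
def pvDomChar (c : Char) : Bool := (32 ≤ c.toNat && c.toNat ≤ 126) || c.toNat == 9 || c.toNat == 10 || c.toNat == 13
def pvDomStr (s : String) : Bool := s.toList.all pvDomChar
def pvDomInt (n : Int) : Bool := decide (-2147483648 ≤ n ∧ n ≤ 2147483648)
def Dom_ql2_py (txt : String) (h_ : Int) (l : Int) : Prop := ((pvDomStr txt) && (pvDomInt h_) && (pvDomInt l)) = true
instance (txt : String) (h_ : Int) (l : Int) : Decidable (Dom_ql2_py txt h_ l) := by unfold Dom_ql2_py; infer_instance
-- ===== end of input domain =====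

-- B replaces A's nested write loops with toggling desc/cont state by a pure comprehension
-- computing each grid cell's source index in closed form (objective: alternative decomposition).

-- ===== PORT A =====
def ql2_py (txt : String) (h_ : Int) (l : Int) : Option (List String) :=
  -- t = str(txt).replace(" ", "")
  let t : List Char := (PySem.Str.replace txt " " "").toList
  if h_ = 0 then none
  else
    -- l = int(len(t) / h): float division then int() truncates toward zero = Int.tdiv
    -- (exact here: |len(t)| and |h| fit well inside the float-exact range)
    let l := if l = 0 then Int.tdiv (PySem.Chars.len t) h_ else l
    -- box = [""] * h * l : h_·l copies of "" when both are positive, else empty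
    let box : List String := List.replicate (h_.toNat * l.toNat) ""
    let st := (PySem.List.pyRange 0 l 1).foldl (fun (st : List String × Bool × Int) lx =>
      let box := st.1
      let desc := st.2.1
      let cont := st.2.2
      let thl := l - lx - 1
      let inner := (PySem.List.pyRange 0 h_ 1).foldl (fun (st2 : List String × Int) hx =>
        let box2 := st2.1
        let cont2 := st2.2
        let thh := if desc then h_ - hx - 1 else hx
        -- box[thh*l+thl] = t[cont]: the write index is always in range when it happens,
        -- and the guarded t[cont] is always in range, so pySetD/pyGetD are exact here
        let box2 := if cont2 < PySem.Chars.len t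
          then PySem.List.pySetD box2 (thh * l + thl) (String.ofList [PySem.List.pyGetD t cont2 ' '])
          else box2
        (box2, cont2 + 1)) (box, cont)
      (inner.1, !desc, inner.2)) (box, false, 0)
    some st.1

-- ===== PORT B =====
def ql2_cell (t : List Char) (h_ : Int) (l : Int) (row : Int) (col : Int) : String :=
  let lx := l - 1 - col
  let hx := if PySem.Int.mod lx 2 = 0 then row else h_ - 1 - row
  let cont := lx * h_ + hx
  if cont < PySem.Chars.len t then String.ofList [PySem.List.pyGetD t cont ' '] else ""

def ql2_py_alt (txt : String) (h_ : Int) (l : Int) : Option (List String) :=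
  let t : List Char := (PySem.Str.replace txt " " "").toList
  if h_ = 0 then none
  else
    let l := if l = 0 then Int.tdiv (PySem.Chars.len t) h_ else l
    some ((PySem.List.pyRange 0 h_ 1).flatMap (fun row =>
      (PySem.List.pyRange 0 l 1).map (fun col => ql2_cell t h_ l row col)))

-- ===== PRECONDITION & SPEC =====
def Spec_ql2_py (txt : String) (h_ : Int) (l : Int) (out : Option (List String)) : Prop := out = ql2_py_alt txt h_ l
instance (txt : String) (h_ : Int) (l : Int) (out : Option (List String)) : Decidable (Spec_ql2_py txt h_ l out) := by unfold Spec_ql2_py; infer_instance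

-- ===== CLAIM (what is proved, stated in full; the proofs are below) =====
def Claim_equal_ql2_py : Prop := ∀ (txt : String) (h_ : Int) (l : Int), Dom_ql2_py txt h_ l → Spec_ql2_py txt h_ l (ql2_py txt h_ l)

-- ===== LEMMAS AND PROOFS =====

-- the column index of grid slot j, row of j, row/col → source character index
def pvLxOf (L j : Nat) : Nat := L - 1 - j % L
def pvHxOf (H L j : Nat) : Nat := if pvLxOf L j % 2 = 0 then j / L else H - 1 - j / L
def pvContOf (H L j : Nat) : Nat := pvLxOf L j * H + pvHxOf H L j

-- the box after the first c writes of A's double loop (global counter cont = c)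
def pvBoxF (t : List Char) (H L c : Nat) : List String :=
  (List.range (H * L)).map (fun j =>
    if pvContOf H L j < c ∧ pvContOf H L j < t.length then String.ofList [t.getD (pvContOf H L j) ' '] else "")

theorem pvBoxF_length (t : List Char) (H L c : Nat) : (pvBoxF t H L c).length = H * L := by
  simp [pvBoxF]

theorem pvBoxF_zero (t : List Char) (H L : Nat) : pvBoxF t H L 0 = List.replicate (H * L) "" := by
  simp [pvBoxF]

theorem pv_mul_add_div {L a r : Nat} (hL : 0 < L) (hr : r < L) : (a * L + r) / L = a := by
  rw [mul_comm, Nat.mul_add_div hL, Nat.div_eq_of_lt hr]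
  omega

theorem pv_mul_add_mod {L a r : Nat} (hr : r < L) : (a * L + r) % L = r := by
  rw [mul_comm, Nat.mul_add_mod, Nat.mod_eq_of_lt hr]

theorem pvHxOf_lt {H L j : Nat} (hH : 0 < H) (hL : 0 < L) (hj : j < H * L) :
    pvHxOf H L j < H := by
  have hq : j / L < H := (Nat.div_lt_iff_lt_mul hL).mpr hj
  unfold pvHxOf
  split
  · exact hq
  · exact Nat.lt_of_le_of_lt (Nat.sub_le (H - 1) (j / L)) (Nat.sub_lt hH Nat.one_pos)

theorem pvContOf_lt {H L j : Nat} (hH : 0 < H) (hL : 0 < L) (hj : j < H * L) :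
    pvContOf H L j < H * L := by
  have hr : j % L < L := Nat.mod_lt _ hL
  have hlx : pvLxOf L j < L := by unfold pvLxOf; omega
  have hhx : pvHxOf H L j < H := pvHxOf_lt hH hL hj
  unfold pvContOf
  calc pvLxOf L j * H + pvHxOf H L j < pvLxOf L j * H + H := by omega
    _ = (pvLxOf L j + 1) * H := by ring
    _ ≤ L * H := Nat.mul_le_mul_right _ (by omega)
    _ = H * L := Nat.mul_comm _ _

theorem pvContOf_inj {H L j j' : Nat} (hH : 0 < H) (hL : 0 < L) (hj : j < H * L) (hj' : j' < H * L)
    (he : pvContOf H L j = pvContOf H L j') : j = j' := by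
  have hr : j % L < L := Nat.mod_lt _ hL
  have hr' : j' % L < L := Nat.mod_lt _ hL
  have hq : j / L < H := (Nat.div_lt_iff_lt_mul hL).mpr hj
  have hq' : j' / L < H := (Nat.div_lt_iff_lt_mul hL).mpr hj'
  have hhx : pvHxOf H L j < H := pvHxOf_lt hH hL hj
  have hhx' : pvHxOf H L j' < H := pvHxOf_lt hH hL hj'
  unfold pvContOf at he
  have hdiv : pvLxOf L j = pvLxOf L j' := by
    have h1 : (pvLxOf L j * H + pvHxOf H L j) / H = pvLxOf L j := pv_mul_add_div hH hhx
    have h2 : (pvLxOf L j' * H + pvHxOf H L j') / H = pvLxOf L j' := pv_mul_add_div hH hhx'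
    rw [← h1, ← h2, he]
  have hmod : pvHxOf H L j = pvHxOf H L j' := by
    have h1 : (pvLxOf L j * H + pvHxOf H L j) % H = pvHxOf H L j := pv_mul_add_mod hhx
    have h2 : (pvLxOf L j' * H + pvHxOf H L j') % H = pvHxOf H L j' := pv_mul_add_mod hhx'
    rw [← h1, ← h2, he]
  have hrr : j % L = j' % L := by unfold pvLxOf at hdiv; omega
  have hqq : j / L = j' / L := by
    unfold pvHxOf at hmod
    unfold pvLxOf at hdiv hmod
    rw [hrr] at hmod
    split at hmod <;> omega
  have d1 := Nat.div_add_mod j L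
  have d2 := Nat.div_add_mod j' L
  rw [← d1, ← d2, hrr, hqq]

-- the grid slot A writes at global time lx*H+hx, and its pvContOf/pvLxOf/pvHxOf
theorem pvIdx_spec {H L lx hx : Nat} (hH : 0 < H) (hL : 0 < L) (hlx : lx < L) (hhx : hx < H) :
    (if lx % 2 = 1 then H - 1 - hx else hx) * L + (L - 1 - lx) < H * L ∧
    pvContOf H L ((if lx % 2 = 1 then H - 1 - hx else hx) * L + (L - 1 - lx)) = lx * H + hx := by
  set thh : Nat := if lx % 2 = 1 then H - 1 - hx else hx with hthhdef
  set idx : Nat := thh * L + (L - 1 - lx) with hidxdef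
  have hthh : thh < H := by rw [hthhdef]; split <;> omega
  have hrlt : L - 1 - lx < L := by omega
  have hidx : idx < H * L := by
    calc thh * L + (L - 1 - lx) < thh * L + L := by omega
      _ = (thh + 1) * L := by ring
      _ ≤ H * L := Nat.mul_le_mul_right _ (by omega)
  refine ⟨hidx, ?_⟩
  have hmod : idx % L = L - 1 - lx := pv_mul_add_mod hrlt
  have hdiv : idx / L = thh := pv_mul_add_div hL hrlt
  have hlxOf : pvLxOf L idx = lx := by unfold pvLxOf; omega
  unfold pvContOf pvHxOf
  rw [hlxOf, hdiv]
  rcases Nat.mod_two_eq_zero_or_one lx with hp | hp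
  · have ht : thh = hx := by rw [hthhdef]; simp [hp]
    simp [hp, ht]
  · have ht : thh = H - 1 - hx := by rw [hthhdef]; simp [hp]
    simp [hp, ht]
    omega

-- one iteration of A's inner loop advances pvBoxF by one
theorem pv_write_step (t : List Char) {H L lx hx : Nat} (hH : 0 < H) (hL : 0 < L)
    (hlx : lx < L) (hhx : hx < H) :
    (if ((lx * H + hx : Nat) : Int) < PySem.Chars.len t
      then PySem.List.pySetD (pvBoxF t H L (lx * H + hx))
             ((((if lx % 2 = 1 then H - 1 - hx else hx) * L + (L - 1 - lx) : Nat)) : Int)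
             (String.ofList [PySem.List.pyGetD t ((lx * H + hx : Nat) : Int) ' '])
      else pvBoxF t H L (lx * H + hx))
    = pvBoxF t H L (lx * H + hx + 1) := by
  have hlen : PySem.Chars.len t = (t.length : Int) := by simp [PySem.Chars.len_eq]
  by_cases hc : lx * H + hx < t.length
  · rw [if_pos (by rw [hlen]; exact_mod_cast hc)]
    obtain ⟨hidx, hcont⟩ := pvIdx_spec hH hL hlx hhx (H := H) (L := L)
    set idx := (if lx % 2 = 1 then H - 1 - hx else hx) * L + (L - 1 - lx) with hidxdef
    rw [PySem.List.pySetD_natCast, PySem.List.pyGetD_natCast]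
    apply List.ext_getElem
    · simp [pvBoxF]
    · intro j hj1 hj2
      have hjlt : j < H * L := by
        have := hj1
        simp only [List.length_set, pvBoxF_length] at this
        exact this
      rw [List.getElem_set]
      by_cases hje : idx = j
      · subst hje
        rw [if_pos rfl]
        simp only [pvBoxF, List.getElem_map, List.getElem_range, hcont]
        rw [if_pos ⟨by omega, hc⟩]
      · rw [if_neg hje]
        have hne : pvContOf H L j ≠ lx * H + hx := by
          intro hcj
          exact hje (pvContOf_inj hH hL hidx hjlt (by rw [hcont, hcj]))
        simp only [pvBoxF, List.getElem_map, List.getElem_range]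
        have hiff : (pvContOf H L j < lx * H + hx ∧ pvContOf H L j < t.length) ↔
               (pvContOf H L j < lx * H + hx + 1 ∧ pvContOf H L j < t.length) := by omega
        rw [if_congr hiff rfl rfl]
  · rw [if_neg (by rw [hlen]; push_cast; omega)]
    unfold pvBoxF
    apply List.map_congr_left
    intro j _
    have hiff : (pvContOf H L j < lx * H + hx ∧ pvContOf H L j < t.length) ↔
           (pvContOf H L j < lx * H + hx + 1 ∧ pvContOf H L j < t.length) := by omega
    rw [if_congr hiff rfl rfl]

-- generic loop-shape: a fold over range n that realises a state trajectory g
theorem pv_foldl_range_shift {σ : Type} (f : σ → Nat → σ) (g : Nat → σ) :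
    ∀ n : Nat, (∀ k < n, f (g k) k = g (k + 1)) → (List.range n).foldl f (g 0) = g n := by
  intro n
  induction n with
  | zero => intro _; simp
  | succ n ih =>
    intro h
    rw [List.range_succ, List.foldl_append, ih (fun k hk => h k (by omega))]
    simpa using h n (by omega)

-- a fold whose step keeps the first component fixed keeps it fixed
theorem pv_foldl_fst {α σ τ : Type} (xs : List α) (f : σ × τ → α → τ) (init : σ × τ) :
    (xs.foldl (fun st x => (st.1, f st x)) init).1 = init.1 := by
  induction xs generalizing init with
  | nil => rfl
  | cons x xs ih => simpa using ih _

-- row-major double comprehension as a single map over range (H*L)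
theorem pv_flatMap_range_map {α : Type} (g : Nat → Nat → α) (L : Nat) (hL : 0 < L) :
    ∀ H : Nat, (List.range H).flatMap (fun r => (List.range L).map (g r))
      = (List.range (H * L)).map (fun j => g (j / L) (j % L)) := by
  intro H
  induction H with
  | zero => simp
  | succ H ih =>
    rw [List.range_succ, List.flatMap_append, ih, Nat.succ_mul, List.range_add, List.map_append,
      List.flatMap_singleton, List.map_map]
    congr 1
    apply List.map_congr_left
    intro c hc
    have hclt : c < L := List.mem_range.mp hc
    simp only [Function.comp_apply]
    rw [pv_mul_add_div hL hclt, pv_mul_add_mod hclt]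

-- parity toggling of desc
theorem pv_parity (k : Nat) : (!decide (k % 2 = 1)) = decide ((k + 1) % 2 = 1) := by
  rcases Nat.mod_two_eq_zero_or_one k with h | h <;> simp [Nat.add_mod, h]

-- ===== the two core characterisations (main case H, L > 0) =====

-- Python % on a nonnegative value with modulus 2
theorem pv_int_mod_two (n : Nat) : PySem.Int.mod ((n : Int)) 2 = ((n % 2 : Nat) : Int) := by
  simp [PySem.Int.mod, Int.fmod_eq_emod]

theorem pv_A_core (t : List Char) (H L : Nat) (hH : 0 < H) (hL : 0 < L) :
    ((PySem.List.pyRange 0 (L : Int) 1).foldl (fun (st : List String × Bool × Int) lx =>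
      let box := st.1
      let desc := st.2.1
      let cont := st.2.2
      let thl := (L : Int) - lx - 1
      let inner := (PySem.List.pyRange 0 (H : Int) 1).foldl (fun (st2 : List String × Int) hx =>
        let box2 := st2.1
        let cont2 := st2.2
        let thh := if desc then (H : Int) - hx - 1 else hx
        let box2 := if cont2 < PySem.Chars.len t
          then PySem.List.pySetD box2 (thh * (L : Int) + thl) (String.ofList [PySem.List.pyGetD t cont2 ' '])
          else box2
        (box2, cont2 + 1)) (box, cont)
      (inner.1, !desc, inner.2)) (List.replicate (H * L) "", false, 0)).1
    = pvBoxF t H L (L * H) := by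
  rw [PySem.List.pyRange_zero_natCast L, List.foldl_map]
  have h0 : ((List.replicate (H * L) "", false, (0 : Int)) : List String × Bool × Int)
      = (pvBoxF t H L (0 * H), decide (0 % 2 = 1), ((0 * H : Nat) : Int)) := by
    simp [pvBoxF_zero]
  rw [h0, pv_foldl_range_shift _
    (fun k => ((pvBoxF t H L (k * H), decide (k % 2 = 1), ((k * H : Nat) : Int)) : List String × Bool × Int)) L ?_]
  · intro k hk
    dsimp only
    rw [PySem.List.pyRange_zero_natCast H, List.foldl_map]
    have hinner : (List.range H).foldl (fun (st2 : List String × Int) (m : Nat) =>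
        (if st2.2 < PySem.Chars.len t
          then PySem.List.pySetD st2.1
            ((if decide (k % 2 = 1) then (H : Int) - (m : Int) - 1 else (m : Int)) * (L : Int) + ((L : Int) - (k : Int) - 1))
            (String.ofList [PySem.List.pyGetD t st2.2 ' '])
          else st2.1, st2.2 + 1))
        (pvBoxF t H L (k * H), ((k * H : Nat) : Int))
        = (pvBoxF t H L (k * H + H), ((k * H + H : Nat) : Int)) := by
      have hbase : ((pvBoxF t H L (k * H), ((k * H : Nat) : Int)) : List String × Int)
          = (pvBoxF t H L (k * H + 0), ((k * H + 0 : Nat) : Int)) := by simp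
      rw [hbase, pv_foldl_range_shift _
        (fun m => ((pvBoxF t H L (k * H + m), ((k * H + m : Nat) : Int)) : List String × Int)) H ?_]
      intro m hm
      dsimp only
      have hthh : (if decide (k % 2 = 1) then (H : Int) - (m : Int) - 1 else (m : Int))
          = (((if k % 2 = 1 then H - 1 - m else m : Nat)) : Int) := by
        rcases Nat.mod_two_eq_zero_or_one k with hp | hp <;> simp [hp] <;> omega
      have hidx : (((if k % 2 = 1 then H - 1 - m else m : Nat)) : Int) * (L : Int) + ((L : Int) - (k : Int) - 1)
          = ((((if k % 2 = 1 then H - 1 - m else m) * L + (L - 1 - k) : Nat)) : Int) := by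
        push_cast
        omega
      rw [hthh, hidx]
      have hw := pv_write_step t hH hL hk hm
      refine Prod.ext ?_ ?_
      · exact hw
      · push_cast; ring
    rw [hinner]
    rw [Nat.succ_mul, pv_parity k]

theorem pv_B_core (t : List Char) (H L : Nat) (hH : 0 < H) (hL : 0 < L) :
    (PySem.List.pyRange 0 (H : Int) 1).flatMap (fun row =>
      (PySem.List.pyRange 0 (L : Int) 1).map (fun col => ql2_cell t (H : Int) (L : Int) row col))
    = pvBoxF t H L (L * H) := by
  have hstep1 : (PySem.List.pyRange 0 (H : Int) 1).flatMap (fun row =>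
      (PySem.List.pyRange 0 (L : Int) 1).map (fun col => ql2_cell t (H : Int) (L : Int) row col))
      = (List.range H).flatMap (fun (r : Nat) => (List.range L).map
          (fun (c : Nat) => ql2_cell t (H : Int) (L : Int) (Nat.cast r) (Nat.cast c))) := by
    rw [PySem.List.pyRange_zero_natCast H, PySem.List.pyRange_zero_natCast L]
    rw [List.flatMap_map]
    simp only [List.map_map]
    rfl
  rw [hstep1]
  calc (List.range H).flatMap (fun (r : Nat) => (List.range L).map
          (fun (c : Nat) => ql2_cell t (H : Int) (L : Int) (Nat.cast r) (Nat.cast c)))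
      = (List.range (H * L)).map (fun j =>
          ql2_cell t (H : Int) (L : Int) ((j / L : Nat) : Int) ((j % L : Nat) : Int)) := by
        exact pv_flatMap_range_map (fun r c => ql2_cell t (H : Int) (L : Int) (Nat.cast r) (Nat.cast c)) L hL H
    _ = pvBoxF t H L (L * H) := by
        unfold pvBoxF
        apply List.map_congr_left
        intro j hj
        have hjlt : j < H * L := List.mem_range.mp hj
        have hr : j % L < L := Nat.mod_lt _ hL
        have hq : j / L < H := (Nat.div_lt_iff_lt_mul hL).mpr hjlt
        have hcl : pvContOf H L j < H * L := pvContOf_lt hH hL hjlt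
        simp only [ql2_cell]
        have hlx : (L : Int) - 1 - ((j % L : Nat) : Int) = ((pvLxOf L j : Nat) : Int) := by
          unfold pvLxOf; omega
        rw [hlx, pv_int_mod_two]
        have hhx : (if ((pvLxOf L j % 2 : Nat) : Int) = 0 then ((j / L : Nat) : Int)
            else (H : Int) - 1 - ((j / L : Nat) : Int)) = ((pvHxOf H L j : Nat) : Int) := by
          unfold pvHxOf
          rcases Nat.mod_two_eq_zero_or_one (pvLxOf L j) with hp | hp <;> simp [hp] <;> omega
        rw [hhx]
        have hcont : ((pvLxOf L j : Nat) : Int) * (H : Int) + ((pvHxOf H L j : Nat) : Int)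
            = ((pvContOf H L j : Nat) : Int) := by
          unfold pvContOf; push_cast; ring
        rw [hcont, PySem.List.pyGetD_natCast]
        have hlen : PySem.Chars.len t = (t.length : Int) := by simp [PySem.Chars.len_eq]
        rw [hlen]
        have hiff : (((pvContOf H L j : Nat) : Int) < (t.length : Int)) ↔
            (pvContOf H L j < L * H ∧ pvContOf H L j < t.length) := by
          constructor
          · intro hlt
            exact ⟨by rw [Nat.mul_comm L H]; exact hcl, by exact_mod_cast hlt⟩
          · intro ⟨_, hlt⟩
            exact_mod_cast hlt
        rw [if_congr hiff rfl rfl]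

-- ===== VERDICT (by name: the statement is the Claim_ definition above) =====
theorem ql2_py_spec : Claim_equal_ql2_py := by
  intro txt h_ l _
  unfold Spec_ql2_py ql2_py ql2_py_alt
  by_cases h0 : h_ = 0
  · simp [h0]
  · simp only [if_neg h0]
    set t : List Char := (PySem.Str.replace txt " " "").toList with ht
    set l' : Int := if l = 0 then Int.tdiv (PySem.Chars.len t) h_ else l with hl'
    rcases lt_trichotomy h_ 0 with hneg | hz | hpos
    · -- h_ < 0 : the inner loop is empty, the box is empty and stays empty; B's outer loop is empty
      have hrange : PySem.List.pyRange 0 h_ 1 = [] := PySem.List.pyRange_one_eq_nil (by omega)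
      have htn : h_.toNat = 0 := by omega
      rw [hrange, htn]
      simp only [List.foldl_nil, List.flatMap_nil, Nat.zero_mul, List.replicate_zero]
      rw [pv_foldl_fst (PySem.List.pyRange 0 l' 1)
        (fun (st : List String × Bool × Int) (_ : Int) => (!st.2.1, st.2.2)) ([], false, 0)]
    · exact absurd hz h0
    · by_cases hlpos : 0 < l'
      · have hHeq : h_ = (h_.toNat : Int) := by omega
        have hLeq : l' = (l'.toNat : Int) := by omega
        rw [hHeq, hLeq]
        simp only [Int.toNat_natCast]
        rw [pv_A_core t h_.toNat l'.toNat (by omega) (by omega),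
          pv_B_core t h_.toNat l'.toNat (by omega) (by omega)]
      · have hrange : PySem.List.pyRange 0 l' 1 = [] := PySem.List.pyRange_one_eq_nil (by omega)
        have hln : l'.toNat = 0 := by omega
        rw [hrange, hln]
        simp
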